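-- pv_equiv track=rewrite | github.com/chris-henry-holland/python-ProjectEulerSolutions | venv/lib/python3.11/site-packages/graph_classes/utils.py | getIthNondecreasingKTuple
-- ===== SOURCE A (Python) =====
-- from typing import (
--     Dict,
--     List,
--     Set,
--     Tuple,
--     Optional,
--     Hashable,
--     Generator,
--     Any,
--     Callable,
--     Iterable,
-- )
-- import math
--
-- def countFunctionNondecreasing(n: int, k: int) -> int:
--     return math.comb(n + k - 1, k)
--
-- def countFunctionIncreasing(n: int, k: int) -> int:
--     return math.comb(n, k)
--
-- def getIthNondecreasingKTuple(i: int, n: int, k: int,\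
--         allow_repeats: bool) -> Tuple[int]:
--
--     count_func = countFunctionNondecreasing if allow_repeats else\
--             countFunctionIncreasing
--
--     if i < 0 or i >= count_func(n, k):
--         raise ValueError("In the function "\
--                 "getIthNondecreasingKTuple(), the given value "\
--                 "of i was outside the valid range for the "\
--                 "given n and k.")
--
--     res = []
--     def recur(i: int, n: int, k: int, prev: int) -> None:
--         if not k: return
--         tot = count_func(n, k)
--         target = tot - i
--         lft, rgt = 0, n - 1
--         while lft < rgt:
--             mid = lft - ((lft - rgt) >> 1)
--             #if tot - countFunction(n - mid, k) <= i:
--             if count_func(n - mid, k) >= target: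
--                 lft = mid
--             else: rgt = mid - 1
--         num = prev + lft
--         res.append(num)
--         lft2 = lft + (not allow_repeats)
--         recur(count_func(n - lft, k) - target, n - lft2, k - 1,\
--                 num + (not allow_repeats))
--         return
--
--     recur(i, n, k, 0)
--     return tuple(res)
-- ===== SOURCE B (Python) =====
-- import math
--
--
-- def getIthNondecreasingKTuple(i: int, n: int, k: int, allow_repeats: bool):
--     # Iterative unranking: explicit loop over the k positions with a linear
--     # scan for the boundary instead of A's recursion + binary search.
--     if allow_repeats:
--         count_func = lambda n, k: math.comb(n + k - 1, k)
--         step = 0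
--     else:
--         count_func = math.comb
--         step = 1
--
--     if i < 0 or i >= count_func(n, k):
--         raise ValueError("In the function "
--                 "getIthNondecreasingKTuple(), the given value "
--                 "of i was outside the valid range for the "
--                 "given n and k.")
--
--     res = []
--     prev = 0
--     for kk in range(k, 0, -1):
--         target = count_func(n, kk) - i
--         mid = 0
--         while mid + 1 <= n - 1 and count_func(n - mid - 1, kk) >= target:
--             mid += 1
--         res.append(prev + mid)
--         i = count_func(n - mid, kk) - target
--         n -= mid + step
--         prev += mid + step
--     return tuple(res)
-- ===== Notes on version B (the rewrite author's own statement) =====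
-- stated objective: alternative
-- what changed: Replaced the recursion-with-inner-binary-search by an explicit iterative loop over the k positions that finds each digit by a linear scan from 0, maintaining (rank, n, prev) state.
import Mathlib
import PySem

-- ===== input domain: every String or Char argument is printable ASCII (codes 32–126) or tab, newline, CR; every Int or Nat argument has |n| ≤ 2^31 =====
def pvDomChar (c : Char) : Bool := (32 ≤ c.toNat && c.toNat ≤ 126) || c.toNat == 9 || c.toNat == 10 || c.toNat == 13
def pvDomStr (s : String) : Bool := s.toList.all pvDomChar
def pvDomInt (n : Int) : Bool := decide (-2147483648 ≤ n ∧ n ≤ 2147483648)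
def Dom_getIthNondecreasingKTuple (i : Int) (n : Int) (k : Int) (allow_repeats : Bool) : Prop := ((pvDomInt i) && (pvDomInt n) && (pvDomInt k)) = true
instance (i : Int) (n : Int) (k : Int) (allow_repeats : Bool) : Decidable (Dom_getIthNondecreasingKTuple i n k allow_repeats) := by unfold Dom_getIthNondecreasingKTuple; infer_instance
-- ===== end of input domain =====

-- ===== PORT A =====
-- B changes the decomposition only: A recurses with a binary search per level, B loops with a linear scan.
-- Both ports raise-free encode Python's ValueError by returning [] outside Pre_ (those inputs are excluded).
-- math.comb(n, k): exact for 0 <= n, 0 <= k (Pre_ keeps every comb call on that domain; Python raises on negatives).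
-- the symmetric falling-product algorithm math.comb uses (exact: each division is exact);
-- proved equal to Nat.choose in pvComb_eq below
def pvCombAux (n : Nat) (r : Nat) : Nat :=
  (List.range r).foldl (fun acc j => acc * (n - j) / (j + 1)) 1

def pvComb (n k : Int) : Int :=
  if k.toNat ≤ n.toNat then (pvCombAux n.toNat (min k.toNat (n.toNat - k.toNat)) : Int) else 0

-- count_func selected from allow_repeats (countFunctionNondecreasing / countFunctionIncreasing)
def pvCF (ar : Bool) (n k : Int) : Int := if ar then pvComb (n + k - 1) k else pvComb n k

-- the inner `while lft < rgt` binary search of A's recur; `(lft - rgt) >> 1` is Int `>>> 1` (Python-exact arithmetic shift)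
def bsearchA (ar : Bool) (k n target lft rgt : Int) : Int :=
  if h : lft < rgt then
    let mid := lft - ((lft - rgt) >>> (1:Nat))
    if target ≤ pvCF ar (n - mid) k then bsearchA ar k n target mid rgt
    else bsearchA ar k n target lft (mid - 1)
  else lft
termination_by (rgt - lft).toNat
decreasing_by
  all_goals simp only [Int.shiftRight_eq_div_pow, pow_one] at *; omega

-- A's recur, structural recursion on k (k.toNat as the count of remaining levels)
def recurA (ar : Bool) : Nat → Int → Int → Int → List Int
  | 0, _, _, _ => []
  | kk+1, i, n, prev =>
    let k : Int := (kk : Int) + 1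
    let tot := pvCF ar n k
    let target := tot - i
    let lft := bsearchA ar k n target 0 (n - 1)
    let num := prev + lft
    let step : Int := if ar then 0 else 1   -- (not allow_repeats) as an int
    num :: recurA ar kk (pvCF ar (n - lft) k - target) (n - (lft + step)) (num + step)

def getIthNondecreasingKTuple (i : Int) (n : Int) (k : Int) (allow_repeats : Bool) : List Int :=
  if i < 0 ∨ pvCF allow_repeats n k ≤ i then []   -- Python: raise ValueError (outside Pre_)
  else recurA allow_repeats k.toNat i n 0

-- ===== PORT B =====
-- the inner `while mid + 1 <= n - 1 and count_func(n - mid - 1, kk) >= target` linear scan of Source B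
def linScanB (ar : Bool) (kk n target mid : Int) : Int :=
  if h : mid + 1 ≤ n - 1 ∧ target ≤ pvCF ar (n - mid - 1) kk then
    linScanB ar kk n target (mid + 1)
  else mid
termination_by (n - 1 - mid).toNat
decreasing_by omega

-- Source B's `for kk in range(k, 0, -1)` loop, accumulating res
def loopB (ar : Bool) (step : Int) : Nat → Int → Int → Int → List Int → List Int
  | 0, _, _, _, res => res
  | kk+1, i, n, prev, res =>
    let kkI : Int := (kk : Int) + 1
    let target := pvCF ar n kkI - i
    let mid := linScanB ar kkI n target 0
    loopB ar step kk (pvCF ar (n - mid) kkI - target) (n - (mid + step)) (prev + (mid + step))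
      (res ++ [prev + mid])

def getIthNondecreasingKTuple_alt (i : Int) (n : Int) (k : Int) (allow_repeats : Bool) : List Int :=
  if i < 0 ∨ pvCF allow_repeats n k ≤ i then []   -- Python: raise ValueError (outside Pre_)
  else loopB allow_repeats (if allow_repeats then 0 else 1) k.toNat i n 0 []

-- ===== PRECONDITION & SPEC =====
-- Exactly the inputs on which Python A returns: math.comb needs 0 ≤ n, 0 ≤ k (and 0 ≤ n+k-1 when
-- allow_repeats), and A's own guard raises ValueError unless 0 ≤ i < count_func(n, k).
def Pre_getIthNondecreasingKTuple (i : Int) (n : Int) (k : Int) (allow_repeats : Bool) : Prop :=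
  0 ≤ n ∧ 0 ≤ k ∧ (allow_repeats = true → 1 ≤ n + k) ∧ 0 ≤ i ∧ i < pvCF allow_repeats n k
instance (i : Int) (n : Int) (k : Int) (allow_repeats : Bool) : Decidable (Pre_getIthNondecreasingKTuple i n k allow_repeats) := by unfold Pre_getIthNondecreasingKTuple; infer_instance

def pvWitness_getIthNondecreasingKTuple : Int × Int × Int × Bool := (1, 3, 2, false)

def Spec_getIthNondecreasingKTuple (i : Int) (n : Int) (k : Int) (allow_repeats : Bool) (out : List Int) : Prop := out = getIthNondecreasingKTuple_alt i n k allow_repeats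
instance (i : Int) (n : Int) (k : Int) (allow_repeats : Bool) (out : List Int) : Decidable (Spec_getIthNondecreasingKTuple i n k allow_repeats out) := by unfold Spec_getIthNondecreasingKTuple; infer_instance


-- ===== CLAIM (what is proved, stated in full; the proofs are below) =====
def Claim_equal_getIthNondecreasingKTuple : Prop := ∀ (i : Int) (n : Int) (k : Int) (allow_repeats : Bool), Dom_getIthNondecreasingKTuple i n k allow_repeats → Pre_getIthNondecreasingKTuple i n k allow_repeats → Spec_getIthNondecreasingKTuple i n k allow_repeats (getIthNondecreasingKTuple i n k allow_repeats)

-- ===== LEMMAS AND PROOFS =====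

-- pvCF is monotone (non-decreasing) in n
lemma pvCombAux_eq (n : Nat) : ∀ r : Nat, pvCombAux n r = n.choose r := by
  intro r
  induction r with
  | zero => simp [pvCombAux]
  | succ r ih =>
    unfold pvCombAux at ih ⊢
    rw [List.range_succ, List.foldl_append, ih, List.foldl_cons, List.foldl_nil]
    rw [← Nat.choose_succ_right_eq n r]
    exact Nat.mul_div_cancel _ (by omega)

lemma pvComb_eq (n k : Int) : pvComb n k = (n.toNat.choose k.toNat : Int) := by
  unfold pvComb
  split
  · rename_i h
    rw [pvCombAux_eq]
    rcases Nat.le_total k.toNat (n.toNat - k.toNat) with hm | hm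
    · rw [min_eq_left hm]
    · rw [min_eq_right hm, Nat.choose_symm h]
  · rename_i h
    rw [Nat.choose_eq_zero_of_lt (by omega)]
    simp

lemma pvCF_mono (ar : Bool) (k : Int) {a b : Int} (h : a ≤ b) :
    pvCF ar a k ≤ pvCF ar b k := by
  unfold pvCF
  rw [pvComb_eq, pvComb_eq, pvComb_eq, pvComb_eq]
  split <;> exact_mod_cast Nat.choose_le_choose _ (Int.toNat_le_toNat (by omega))

-- the predicate both searches bound: target ≤ pvCF ar (n - m) k, antitone in m
def Pd (ar : Bool) (k n target m : Int) : Prop := target ≤ pvCF ar (n - m) k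

lemma Pd_anti (ar : Bool) (k n target : Int) {a b : Int} (hab : a ≤ b)
    (hb : Pd ar k n target b) : Pd ar k n target a :=
  le_trans hb (pvCF_mono ar k (by omega))

lemma bsearchA_spec (ar : Bool) (k n target : Int) :
    ∀ lft rgt : Int, lft ≤ rgt → Pd ar k n target lft →
      lft ≤ bsearchA ar k n target lft rgt ∧ bsearchA ar k n target lft rgt ≤ rgt ∧
      Pd ar k n target (bsearchA ar k n target lft rgt) ∧
      (bsearchA ar k n target lft rgt = rgt ∨ ¬ Pd ar k n target (bsearchA ar k n target lft rgt + 1)) := by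
  suffices H : ∀ (f : Nat) (lft rgt : Int), (rgt - lft).toNat ≤ f → lft ≤ rgt → Pd ar k n target lft →
      lft ≤ bsearchA ar k n target lft rgt ∧ bsearchA ar k n target lft rgt ≤ rgt ∧
      Pd ar k n target (bsearchA ar k n target lft rgt) ∧
      (bsearchA ar k n target lft rgt = rgt ∨ ¬ Pd ar k n target (bsearchA ar k n target lft rgt + 1)) by
    exact fun lft rgt h1 h2 => H (rgt - lft).toNat lft rgt le_rfl h1 h2
  intro f
  induction f with
  | zero =>
    intro lft rgt hf h1 h2
    rw [bsearchA, dif_neg (by omega)]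
    exact ⟨le_rfl, h1, h2, Or.inl (by omega)⟩
  | succ f ih =>
    intro lft rgt hf h1 h2
    rw [bsearchA]
    by_cases hlr : lft < rgt
    · rw [dif_pos hlr]
      have hs : (lft - rgt) >>> (1:Nat) = (lft - rgt) / 2 := by
        simp [Int.shiftRight_eq_div_pow]
      have hmid : lft + 1 ≤ lft - ((lft - rgt) >>> (1:Nat)) ∧
          lft - ((lft - rgt) >>> (1:Nat)) ≤ rgt := by rw [hs]; omega
      set mid := lft - ((lft - rgt) >>> (1:Nat)) with hmdef
      dsimp only
      split_ifs with hp
      · have h := ih mid rgt (by omega) (by omega) hp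
        exact ⟨by omega, h.2.1, h.2.2⟩
      · have h := ih lft (mid - 1) (by omega) (by omega) h2
        refine ⟨h.1, by omega, h.2.2.1, ?_⟩
        rcases h.2.2.2 with hr | hr
        · right
          have : bsearchA ar k n target lft (mid - 1) + 1 = mid := by omega
          rw [this]
          exact hp
        · exact Or.inr hr
    · rw [dif_neg hlr]
      exact ⟨le_rfl, h1, h2, Or.inl (by omega)⟩

lemma linScanB_spec (ar : Bool) (k n target : Int) :
    ∀ mid : Int, mid ≤ n - 1 → Pd ar k n target mid →
      mid ≤ linScanB ar k n target mid ∧ linScanB ar k n target mid ≤ n - 1 ∧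
      Pd ar k n target (linScanB ar k n target mid) ∧
      (linScanB ar k n target mid = n - 1 ∨ ¬ Pd ar k n target (linScanB ar k n target mid + 1)) := by
  suffices H : ∀ (f : Nat) (mid : Int), (n - 1 - mid).toNat ≤ f → mid ≤ n - 1 → Pd ar k n target mid →
      mid ≤ linScanB ar k n target mid ∧ linScanB ar k n target mid ≤ n - 1 ∧
      Pd ar k n target (linScanB ar k n target mid) ∧
      (linScanB ar k n target mid = n - 1 ∨ ¬ Pd ar k n target (linScanB ar k n target mid + 1)) by
    exact fun mid h1 h2 => H (n - 1 - mid).toNat mid le_rfl h1 h2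
  intro f
  induction f with
  | zero =>
    intro mid hf h1 h2
    rw [linScanB, dif_neg (by omega)]
    exact ⟨le_rfl, h1, h2, Or.inl (by omega)⟩
  | succ f ih =>
    intro mid hf h1 h2
    rw [linScanB]
    by_cases hc : mid + 1 ≤ n - 1 ∧ target ≤ pvCF ar (n - mid - 1) k
    · rw [dif_pos hc]
      have hpd : Pd ar k n target (mid + 1) := by
        unfold Pd
        have : n - (mid + 1) = n - mid - 1 := by ring
        rw [this]
        exact hc.2
      have h := ih (mid + 1) (by omega) hc.1 hpd
      exact ⟨by omega, h.2.1, h.2.2⟩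
    · rw [dif_neg hc]
      refine ⟨le_rfl, h1, h2, ?_⟩
      by_cases hend : mid = n - 1
      · exact Or.inl hend
      · right
        intro hP
        apply hc
        refine ⟨by omega, ?_⟩
        unfold Pd at hP
        have : n - (mid + 1) = n - mid - 1 := by ring
        rw [this] at hP
        exact hP

-- a monotone predicate has a unique boundary point
lemma boundary_unique (ar : Bool) (k n target : Int) {m1 m2 : Int}
    (h1 : m1 ≤ n - 1 ∧ Pd ar k n target m1 ∧ (m1 = n - 1 ∨ ¬ Pd ar k n target (m1 + 1)))
    (h2 : m2 ≤ n - 1 ∧ Pd ar k n target m2 ∧ (m2 = n - 1 ∨ ¬ Pd ar k n target (m2 + 1))) :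
    m1 = m2 := by
  by_contra hne
  rcases lt_or_gt_of_ne hne with hlt | hlt
  · rcases h1.2.2 with h | h
    · omega
    · exact h (Pd_anti ar k n target (by omega) h2.2.1)
  · rcases h2.2.2 with h | h
    · omega
    · exact h (Pd_anti ar k n target (by omega) h1.2.1)

-- both searches, from 0, return the same index (given rank 0 ≤ i, i.e. the predicate holds at 0)
lemma search_eq (ar : Bool) (k n target : Int) (h0 : Pd ar k n target 0) :
    bsearchA ar k n target 0 (n - 1) = linScanB ar k n target 0 := by
  by_cases hn : 0 ≤ n - 1
  · have hb := bsearchA_spec ar k n target 0 (n - 1) hn h0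
    have hl := linScanB_spec ar k n target 0 hn h0
    exact boundary_unique ar k n target ⟨hb.2.1, hb.2.2.1, hb.2.2.2⟩ ⟨hl.2.1, hl.2.2.1, hl.2.2.2⟩
  · rw [bsearchA, linScanB]
    rw [dif_neg (by omega), dif_neg (by omega)]

-- B's loop accumulator splits off
lemma loopB_append (ar : Bool) (step : Int) :
    ∀ (f : Nat) (i n prev : Int) (res : List Int),
      loopB ar step f i n prev res = res ++ loopB ar step f i n prev [] := by
  intro f
  induction f with
  | zero => intro i n prev res; simp [loopB]
  | succ kk ih =>
    intro i n prev res
    rw [loopB, loopB]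
    rw [ih _ _ _ (res ++ _), ih _ _ _ ([] ++ _)]
    simp

-- level-by-level agreement of A's recursion and B's loop
lemma recurA_eq_loopB (ar : Bool) :
    ∀ (f : Nat) (i n prev : Int), 0 ≤ i →
      recurA ar f i n prev = loopB ar (if ar then 0 else 1) f i n prev [] := by
  intro f
  induction f with
  | zero => intro i n prev _; simp [recurA, loopB]
  | succ kk ih =>
    intro i n prev hi
    simp only [recurA, loopB]
    have h0 : Pd ar ((kk : Int) + 1) n (pvCF ar n ((kk : Int) + 1) - i) 0 := by
      unfold Pd; simp only [sub_zero]; omega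
    have hse := search_eq ar ((kk : Int) + 1) n (pvCF ar n ((kk : Int) + 1) - i) h0
    rw [hse]
    set m := linScanB ar ((kk : Int) + 1) n (pvCF ar n ((kk : Int) + 1) - i) 0 with hm
    have hPm : Pd ar ((kk : Int) + 1) n (pvCF ar n ((kk : Int) + 1) - i) m := by
      by_cases hn : (0:Int) ≤ n - 1
      · exact (linScanB_spec ar _ n _ 0 hn h0).2.2.1
      · rw [linScanB] at hm; rw [dif_neg (by omega)] at hm; rw [hm]; simpa using h0
    have hi' : 0 ≤ pvCF ar (n - m) ((kk : Int) + 1) - (pvCF ar n ((kk : Int) + 1) - i) := by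
      unfold Pd at hPm; omega
    rw [ih _ _ _ hi']
    have hrw : prev + (m + (if ar = true then (0:Int) else 1)) = prev + m + (if ar = true then (0:Int) else 1) := by ring
    rw [hrw, loopB_append ar _ kk _ _ _ ([] ++ [prev + m])]
    simp

-- ===== VERDICT (by name: the statement is the Claim_ definition above) =====
theorem getIthNondecreasingKTuple_spec : Claim_equal_getIthNondecreasingKTuple := by
  intro i n k ar _ hpre
  unfold Spec_getIthNondecreasingKTuple getIthNondecreasingKTuple getIthNondecreasingKTuple_alt
  rcases hpre with ⟨_, _, _, hi, hcnt⟩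
  rw [if_neg (by omega), if_neg (by omega)]
  exact recurA_eq_loopB ar k.toNat i n 0 hi
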